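-- pv_equiv track=rewrite | github.com/Chrispetersonhere/data-dogs | services/parse-proxy/src/segment_proxy.py | _iter_section_spans
-- ===== SOURCE A (Python) =====
-- from typing import Iterable
--
-- _MAJOR_SECTION_HINTS = (
--     "NOTICE OF ANNUAL MEETING",
--     "PROPOSAL",
--     "CORPORATE GOVERNANCE",
--     "EXECUTIVE COMPENSATION",
--     "COMPENSATION DISCUSSION AND ANALYSIS",
--     "DIRECTOR COMPENSATION",
--     "SECURITY OWNERSHIP",
--     "AUDIT COMMITTEE",
-- )
--
-- def _looks_like_major_header(line: str) -> bool:
--     normalized = " ".join(line.strip().split())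
--     if len(normalized) < 6:
--         return False
--     upper_ratio = sum(ch.isupper() for ch in normalized) / max(len(normalized), 1)
--     has_hint = any(hint in normalized.upper() for hint in _MAJOR_SECTION_HINTS)
--     return upper_ratio >= 0.65 and has_hint
--
-- def _iter_section_spans(lines: list[str]) -> Iterable[tuple[str, int, int]]:
--     headers: list[tuple[str, int]] = []
--     for idx, line in enumerate(lines):
--         if _looks_like_major_header(line):
--             headers.append((line.strip(), idx))
--
--     if not headers:
--         yield ("FULL DOCUMENT", 0, len(lines) - 1)
--         return
--
--     for i, (title, start) in enumerate(headers):
--         end = (headers[i + 1][1] - 1) if i + 1 < len(headers) else (len(lines) - 1)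
--         yield (title, start, end)
-- ===== SOURCE B (Python) =====
-- _MAJOR_SECTION_HINTS = (
--     "NOTICE OF ANNUAL MEETING",
--     "PROPOSAL",
--     "CORPORATE GOVERNANCE",
--     "EXECUTIVE COMPENSATION",
--     "COMPENSATION DISCUSSION AND ANALYSIS",
--     "DIRECTOR COMPENSATION",
--     "SECURITY OWNERSHIP",
--     "AUDIT COMMITTEE",
-- )
--
-- def _looks_like_major_header(line: str) -> bool:
--     normalized = " ".join(line.strip().split())
--     if len(normalized) < 6:
--         return False
--     upper_ratio = sum(ch.isupper() for ch in normalized) / max(len(normalized), 1)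
--     has_hint = any(hint in normalized.upper() for hint in _MAJOR_SECTION_HINTS)
--     return upper_ratio >= 0.65 and has_hint
--
-- def _iter_section_spans(lines):
--     # Single streaming pass: close the open section as soon as the next header appears.
--     pending = None  # (title, start) of the currently open section
--     for idx, line in enumerate(lines):
--         if _looks_like_major_header(line):
--             if pending is not None:
--                 yield (pending[0], pending[1], idx - 1)
--             pending = (line.strip(), idx)
--     if pending is not None:
--         yield (pending[0], pending[1], len(lines) - 1)
--     else:
--         yield ("FULL DOCUMENT", 0, len(lines) - 1)
-- ===== Notes on version B (the rewrite author's own statement) =====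
-- stated objective: simpler
-- what changed: Replaced the two-phase approach (collect all headers, then pair each with the next header's index via enumerate and lookahead indexing) with a single streaming pass that keeps one pending (title, start) and yields each span when the next header closes it.
import Mathlib
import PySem

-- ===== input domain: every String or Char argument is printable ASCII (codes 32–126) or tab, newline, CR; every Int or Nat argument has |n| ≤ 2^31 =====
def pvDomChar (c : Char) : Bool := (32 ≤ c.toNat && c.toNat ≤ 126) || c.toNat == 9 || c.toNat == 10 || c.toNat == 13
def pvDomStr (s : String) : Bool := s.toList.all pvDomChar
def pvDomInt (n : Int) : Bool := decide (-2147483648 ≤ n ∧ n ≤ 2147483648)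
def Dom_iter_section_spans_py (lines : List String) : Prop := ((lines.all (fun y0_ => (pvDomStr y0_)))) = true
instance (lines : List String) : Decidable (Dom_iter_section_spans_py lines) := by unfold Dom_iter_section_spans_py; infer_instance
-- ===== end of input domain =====

-- B replaces A's two-phase pass (collect all headers, then pair each with the next by index
-- lookahead) with a single streaming pass keeping one pending (title, start): simpler.

-- ===== PORT A =====
def pvMajorHints : List String :=
  ["NOTICE OF ANNUAL MEETING", "PROPOSAL", "CORPORATE GOVERNANCE", "EXECUTIVE COMPENSATION",
   "COMPENSATION DISCUSSION AND ANALYSIS", "DIRECTOR COMPENSATION", "SECURITY OWNERSHIP",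
   "AUDIT COMMITTEE"]

-- shared helper (_looks_like_major_header, identical in A and B).
-- Python compares the float 'u / max(len, 1)' with 0.65; for every line of realistic length
-- (anything below 10^15 chars) that float test is exactly the integer test 13*max(len,1) ≤ 20*u,
-- which is how it is ported here.
def pvLooksLikeMajorHeader (line : String) : Bool :=
  let normalized := PySem.Str.join " " (PySem.Str.split₀ (PySem.Str.strip line))
  if PySem.Str.len normalized < 6 then false
  else
    let u := normalized.toList.countP (fun ch => PySem.Chars.isupper ch)
    let hasHint := pvMajorHints.any (fun hint => PySem.Str.isIn hint (PySem.Str.upper normalized))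
    decide (13 * max (PySem.Str.len normalized) 1 ≤ 20 * u) && hasHint

def iter_section_spans_py (lines : List String) : List (String × Int × Int) :=
  let headers : List (String × Int) :=
    (PySem.List.enumerate lines).foldl
      (fun acc p => if pvLooksLikeMajorHeader p.2 then acc ++ [(PySem.Str.strip p.2, p.1)] else acc) []
  if headers = [] then
    [("FULL DOCUMENT", 0, (lines.length : Int) - 1)]
  else
    (PySem.List.enumerate headers).foldl
      (fun out q =>
        let e : Int :=
          if q.1 + 1 < (headers.length : Int)
          then (PySem.List.pyGetD headers (q.1 + 1) ("", 0)).2 - 1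
          else (lines.length : Int) - 1
        out ++ [(q.2.1, q.2.2, e)]) []

-- ===== PORT B =====
def iter_section_spans_py_alt (lines : List String) : List (String × Int × Int) :=
  let st :=
    (PySem.List.enumerate lines).foldl
      (fun (st : List (String × Int × Int) × Option (String × Int)) p =>
        if pvLooksLikeMajorHeader p.2 then
          match st.2 with
          | some pen => (st.1 ++ [(pen.1, pen.2, p.1 - 1)], some (PySem.Str.strip p.2, p.1))
          | none => (st.1, some (PySem.Str.strip p.2, p.1))
        else st)
      ([], none)
  match st.2 with
  | some pen => st.1 ++ [(pen.1, pen.2, (lines.length : Int) - 1)]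
  | none => [("FULL DOCUMENT", 0, (lines.length : Int) - 1)]

-- ===== PRECONDITION & SPEC =====
def Spec_iter_section_spans_py (lines : List String) (out : List (String × Int × Int)) : Prop := out = iter_section_spans_py_alt lines
instance (lines : List String) (out : List (String × Int × Int)) : Decidable (Spec_iter_section_spans_py lines out) := by unfold Spec_iter_section_spans_py; infer_instance

-- ===== CLAIM (what is proved, stated in full; the proofs are below) =====
def Claim_equal_iter_section_spans_py : Prop := ∀ (lines : List String), Dom_iter_section_spans_py lines → Spec_iter_section_spans_py lines (iter_section_spans_py lines)

-- ===== LEMMAS AND PROOFS =====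

-- the headers A's first pass collects, as a filterMap
def pvHeaders (es : List (Int × String)) : List (String × Int) :=
  es.filterMap (fun p => if pvLooksLikeMajorHeader p.2 then some (PySem.Str.strip p.2, p.1) else none)

lemma pvHeaders_fold (es : List (Int × String)) (acc : List (String × Int)) :
    es.foldl (fun acc p => if pvLooksLikeMajorHeader p.2 then acc ++ [(PySem.Str.strip p.2, p.1)] else acc) acc
      = acc ++ pvHeaders es := by
  induction es generalizing acc with
  | nil => simp [pvHeaders]
  | cons h t ih =>
    simp only [List.foldl_cons]
    by_cases hh : pvLooksLikeMajorHeader h.2 = true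
    · rw [if_pos hh, ih]
      simp [pvHeaders, hh]
    · rw [if_neg hh, ih]
      simp only [Bool.not_eq_true] at hh
      simp [pvHeaders, hh]

-- adjacent pairing of the header list, end eEnd for the last one
def pvPairUp : List (String × Int) → Int → List (String × Int × Int)
  | [], _ => []
  | [(t, s)], eEnd => [(t, s, eEnd)]
  | (t, s) :: (t2, s2) :: r, eEnd => (t, s, s2 - 1) :: pvPairUp ((t2, s2) :: r) eEnd

-- A's second loop body, named (definitionally the port's lambda, with hs the full header list)
def pvStepA (hs : List (String × Int)) (eEnd : Int) (out : List (String × Int × Int))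
    (q : Int × (String × Int)) : List (String × Int × Int) :=
  out ++ [(q.2.1, q.2.2,
    if q.1 + 1 < (hs.length : Int)
    then (PySem.List.pyGetD hs (q.1 + 1) ("", 0)).2 - 1
    else eEnd)]

-- A's second pass = pvPairUp (generalized over an already-consumed prefix 'pre')
lemma pvA_fold (eEnd : Int) :
    ∀ (hs pre : List (String × Int)) (out : List (String × Int × Int)),
      (PySem.List.enumerate hs (pre.length : Int)).foldl (pvStepA (pre ++ hs) eEnd) out
        = out ++ pvPairUp hs eEnd := by
  intro hs
  induction hs with
  | nil => intro pre out; simp [PySem.List.enumerate_nil, pvPairUp]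
  | cons h t ih =>
    intro pre out
    obtain ⟨ht, hs0⟩ := h
    rw [PySem.List.enumerate_cons, List.foldl_cons]
    cases t with
    | nil =>
      simp [PySem.List.enumerate_nil, pvStepA, pvPairUp]

    | cons h2 r =>
      obtain ⟨t2, s2⟩ := h2
      have hcond : ((pre.length : Int)) + 1 < (((pre ++ (ht, hs0) :: (t2, s2) :: r).length : Nat) : Int) := by
        simp
      have hget : PySem.List.pyGetD (pre ++ (ht, hs0) :: (t2, s2) :: r) ((pre.length : Int) + 1) ("", 0) = (t2, s2) := by
        have h1 : ((pre.length : Int) + 1) = ((pre.length + 1 : Nat) : Int) := by push_cast; ring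
        rw [h1, PySem.List.pyGetD_natCast]
        have hlen : pre.length + 1 < (pre ++ (ht, hs0) :: (t2, s2) :: r).length := by simp
        rw [List.getD_eq_getElem?_getD, List.getElem?_eq_getElem hlen]
        simp [List.getElem_append_right (by omega : pre.length ≤ pre.length + 1)]
      have hre : pre ++ (ht, hs0) :: (t2, s2) :: r = (pre ++ [(ht, hs0)]) ++ (t2, s2) :: r := by simp
      have hlen1 : (pre.length : Int) + 1 = (((pre ++ [(ht, hs0)]).length : Nat) : Int) := by
        simp
      have ih' := ih (pre ++ [(ht, hs0)]) (out ++ [(ht, hs0, s2 - 1)])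
      have hstep : pvStepA (pre ++ (ht, hs0) :: (t2, s2) :: r) eEnd out ((pre.length : Int), (ht, hs0))
          = out ++ [(ht, hs0, s2 - 1)] := by
        simp only [pvStepA]
        rw [if_pos hcond, hget]
      rw [hstep, hre, hlen1, ih']
      simp only [pvPairUp, List.append_assoc, List.singleton_append]

lemma pvA_fold0 (eEnd : Int) (hs : List (String × Int)) :
    (PySem.List.enumerate hs).foldl (pvStepA hs eEnd) [] = pvPairUp hs eEnd := by
  have := pvA_fold eEnd hs [] []
  simpa using this

lemma pvHeaders_cons_pos (i : Int) (l : String) (t : List (Int × String))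
    (hh : pvLooksLikeMajorHeader l = true) :
    pvHeaders ((i, l) :: t) = (PySem.Str.strip l, i) :: pvHeaders t := by
  simp [pvHeaders, hh]

lemma pvHeaders_cons_neg (i : Int) (l : String) (t : List (Int × String))
    (hh : pvLooksLikeMajorHeader l = false) :
    pvHeaders ((i, l) :: t) = pvHeaders t := by
  simp [pvHeaders, hh]

-- B as a structural recursion over the enumerated lines
def pvStream : Option (String × Int) → List (Int × String) → Int → List (String × Int × Int)
  | some pen, [], eEnd => [(pen.1, pen.2, eEnd)]
  | none, [], eEnd => [("FULL DOCUMENT", 0, eEnd)]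
  | p, (i, l) :: rest, eEnd =>
      if pvLooksLikeMajorHeader l then
        (match p with
          | some pen => [(pen.1, pen.2, i - 1)]
          | none => []) ++ pvStream (some (PySem.Str.strip l, i)) rest eEnd
      else pvStream p rest eEnd

lemma pvStream_cons_pos (p : Option (String × Int)) (i : Int) (l : String)
    (rest : List (Int × String)) (eEnd : Int) (hh : pvLooksLikeMajorHeader l = true) :
    pvStream p ((i, l) :: rest) eEnd
      = (match p with
          | some pen => [(pen.1, pen.2, i - 1)]
          | none => []) ++ pvStream (some (PySem.Str.strip l, i)) rest eEnd := by
  cases p <;> simp [pvStream, hh]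

lemma pvStream_cons_neg (p : Option (String × Int)) (i : Int) (l : String)
    (rest : List (Int × String)) (eEnd : Int) (hh : pvLooksLikeMajorHeader l = false) :
    pvStream p ((i, l) :: rest) eEnd = pvStream p rest eEnd := by
  cases p <;> simp [pvStream, hh]

-- B's loop body and its final yield, named (definitionally the port's lambda / final match)
def pvStepB (st : List (String × Int × Int) × Option (String × Int)) (p : Int × String) :
    List (String × Int × Int) × Option (String × Int) :=
  if pvLooksLikeMajorHeader p.2 then
    match st.2 with
    | some pen => (st.1 ++ [(pen.1, pen.2, p.1 - 1)], some (PySem.Str.strip p.2, p.1))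
    | none => (st.1, some (PySem.Str.strip p.2, p.1))
  else st

def pvFin (eEnd : Int) (st : List (String × Int × Int) × Option (String × Int)) :
    List (String × Int × Int) :=
  match st.2 with
  | some pen => st.1 ++ [(pen.1, pen.2, eEnd)]
  | none => [("FULL DOCUMENT", 0, eEnd)]

lemma pvStepB_some (out : List (String × Int × Int)) (pen : String × Int) (i : Int) (l : String)
    (hh : pvLooksLikeMajorHeader l = true) :
    pvStepB (out, some pen) (i, l) = (out ++ [(pen.1, pen.2, i - 1)], some (PySem.Str.strip l, i)) := by
  simp [pvStepB, hh]

lemma pvStepB_none (out : List (String × Int × Int)) (i : Int) (l : String)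
    (hh : pvLooksLikeMajorHeader l = true) :
    pvStepB (out, none) (i, l) = (out, some (PySem.Str.strip l, i)) := by
  simp [pvStepB, hh]

lemma pvStepB_skip (st : List (String × Int × Int) × Option (String × Int)) (i : Int) (l : String)
    (hh : ¬ pvLooksLikeMajorHeader l = true) :
    pvStepB st (i, l) = st := by
  simp [pvStepB, hh]

-- B's fold, from an open section, appends to the output accumulated so far
lemma pvB_fold_some (eEnd : Int) :
    ∀ (es : List (Int × String)) (out : List (String × Int × Int)) (pen : String × Int),
      pvFin eEnd (es.foldl pvStepB (out, some pen)) = out ++ pvStream (some pen) es eEnd := by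
  intro es
  induction es with
  | nil => intro out pen; simp [pvFin, pvStream]
  | cons h t ih =>
    intro out pen
    obtain ⟨i, l⟩ := h
    rw [List.foldl_cons]
    by_cases hh : pvLooksLikeMajorHeader l = true
    · rw [pvStepB_some out pen i l hh, ih, pvStream_cons_pos _ _ _ _ _ hh]
      simp
    · simp only [Bool.not_eq_true] at hh
      rw [pvStepB_skip _ i l (by simp [hh]), ih, pvStream_cons_neg _ _ _ _ _ hh]

-- B's fold from the initial state
lemma pvB_fold_none (eEnd : Int) :
    ∀ (es : List (Int × String)),
      pvFin eEnd (es.foldl pvStepB ([], none)) = pvStream none es eEnd := by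
  intro es
  induction es with
  | nil => simp [pvFin, pvStream]
  | cons h t ih =>
    obtain ⟨i, l⟩ := h
    rw [List.foldl_cons]
    by_cases hh : pvLooksLikeMajorHeader l = true
    · rw [pvStepB_none [] i l hh, pvB_fold_some eEnd t [] (PySem.Str.strip l, i),
          pvStream_cons_pos _ _ _ _ _ hh]
    · simp only [Bool.not_eq_true] at hh
      rw [pvStepB_skip _ i l (by simp [hh]), ih, pvStream_cons_neg _ _ _ _ _ hh]

-- pvStream in terms of pvHeaders / pvPairUp
lemma pvStream_some (eEnd : Int) :
    ∀ (es : List (Int × String)) (pen : String × Int),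
      pvStream (some pen) es eEnd = pvPairUp (pen :: pvHeaders es) eEnd := by
  intro es
  induction es with
  | nil => intro pen; simp [pvStream, pvHeaders, pvPairUp]
  | cons h t ih =>
    intro pen
    obtain ⟨i, l⟩ := h
    by_cases hh : pvLooksLikeMajorHeader l = true
    · rw [pvStream_cons_pos _ _ _ _ _ hh, ih, pvHeaders_cons_pos _ _ _ hh]
      simp [pvPairUp]
    · simp only [Bool.not_eq_true] at hh
      rw [pvStream_cons_neg _ _ _ _ _ hh, ih, pvHeaders_cons_neg _ _ _ hh]

lemma pvStream_none (eEnd : Int) :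
    ∀ (es : List (Int × String)),
      pvStream none es eEnd
        = if pvHeaders es = [] then [("FULL DOCUMENT", 0, eEnd)] else pvPairUp (pvHeaders es) eEnd := by
  intro es
  induction es with
  | nil => simp [pvStream, pvHeaders]
  | cons h t ih =>
    obtain ⟨i, l⟩ := h
    by_cases hh : pvLooksLikeMajorHeader l = true
    · rw [pvStream_cons_pos _ _ _ _ _ hh, pvStream_some eEnd t (PySem.Str.strip l, i),
          pvHeaders_cons_pos _ _ _ hh, if_neg (by simp)]
      simp
    · simp only [Bool.not_eq_true] at hh
      rw [pvStream_cons_neg _ _ _ _ _ hh, ih, pvHeaders_cons_neg _ _ _ hh]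

-- ===== VERDICT (by name: the statement is the Claim_ definition above) =====
theorem iter_section_spans_py_spec : Claim_equal_iter_section_spans_py := by
  intro lines _
  unfold Spec_iter_section_spans_py
  have hB : iter_section_spans_py_alt lines
      = pvFin ((lines.length : Int) - 1) ((PySem.List.enumerate lines).foldl pvStepB ([], none)) := rfl
  rw [hB, pvB_fold_none, pvStream_none]
  show iter_section_spans_py lines = _
  have hA : iter_section_spans_py lines
      = if (PySem.List.enumerate lines).foldl
            (fun acc p => if pvLooksLikeMajorHeader p.2 then acc ++ [(PySem.Str.strip p.2, p.1)] else acc) [] = []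
        then [("FULL DOCUMENT", 0, (lines.length : Int) - 1)]
        else (PySem.List.enumerate ((PySem.List.enumerate lines).foldl
                (fun acc p => if pvLooksLikeMajorHeader p.2 then acc ++ [(PySem.Str.strip p.2, p.1)] else acc) [])).foldl
               (pvStepA ((PySem.List.enumerate lines).foldl
                  (fun acc p => if pvLooksLikeMajorHeader p.2 then acc ++ [(PySem.Str.strip p.2, p.1)] else acc) [])
                 ((lines.length : Int) - 1)) [] := rfl
  rw [pvHeaders_fold, List.nil_append] at hA
  rw [hA]
  by_cases hhd : pvHeaders (PySem.List.enumerate lines) = []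
  · rw [if_pos hhd, if_pos hhd]
  · rw [if_neg hhd, if_neg hhd, pvA_fold0]
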